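-- pv_equiv track=rewrite | github.com/RipJawzz/Coursework | CS 235 AI Assignments/ai_assignment_3_1ori.py | fitness_value
-- ===== SOURCE A (Python) =====
-- def fitness_value(queen_arrangement):
--     fv = 0
--     for i in range(8):
--         ok = True
--         for r in range(8):
--             if r == i:
--                 continue
--             # checks for same row
--             if queen_arrangement[i] == queen_arrangement[r]:
--                 ok = False
--                 break
--             # checks on diagonals
--             if queen_arrangement[i] - i == queen_arrangement[r] - r or queen_arrangement[i] + i == queen_arrangement[
--                 r] + r:
--                 ok = False
--                 break
--
--         if ok:
--             fv += 1
--     return fv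
-- ===== SOURCE B (Python) =====
-- def fitness_value(queen_arrangement):
--     rowk = [queen_arrangement[i] for i in range(8)]
--     diagk = [queen_arrangement[i] - i for i in range(8)]
--     antik = [queen_arrangement[i] + i for i in range(8)]
--     rows = {}
--     for v in rowk:
--         rows[v] = rows.get(v, 0) + 1
--     diags = {}
--     for v in diagk:
--         diags[v] = diags.get(v, 0) + 1
--     antis = {}
--     for v in antik:
--         antis[v] = antis.get(v, 0) + 1
--     fv = 0
--     for i in range(8):
--         v = queen_arrangement[i]
--         if rows[v] == 1 and diags[v - i] == 1 and antis[v + i] == 1: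
--             fv += 1
--     return fv
-- ===== Notes on version B (the rewrite author's own statement) =====
-- stated objective: alternative
-- what changed: Replaces the nested pairwise conflict scan with three frequency tables (row, diagonal, anti-diagonal) built in one pass, then a second pass counting queens whose three keys each occur exactly once.
import Mathlib
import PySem

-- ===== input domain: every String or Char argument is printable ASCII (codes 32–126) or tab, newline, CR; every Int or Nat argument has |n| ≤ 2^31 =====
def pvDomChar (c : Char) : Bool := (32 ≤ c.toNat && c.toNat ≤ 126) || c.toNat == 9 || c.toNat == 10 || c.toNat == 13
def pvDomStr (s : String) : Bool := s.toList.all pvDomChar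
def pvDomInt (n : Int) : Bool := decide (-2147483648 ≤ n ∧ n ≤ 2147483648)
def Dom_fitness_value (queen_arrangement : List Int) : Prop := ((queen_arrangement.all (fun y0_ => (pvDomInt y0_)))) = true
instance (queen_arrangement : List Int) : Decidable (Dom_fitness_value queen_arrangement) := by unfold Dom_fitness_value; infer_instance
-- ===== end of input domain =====

-- B replaces A's nested pairwise conflict scan with three frequency tables and a lookup pass (alternative decomposition, same result).
-- Indexing uses pyGetD (total form of xs[i]); Pre_ guarantees every accessed index is in range, exactly where the Python returns.

-- ===== PORT A =====
-- inner 'for r in range(8)' loop with its two break-ing checks, as structural recursion over the remaining r values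
def fvInnerA (xs : List Int) (i : Int) : List Int → Bool
  | [] => true
  | r :: rest =>
    if r = i then fvInnerA xs i rest
    else if PySem.List.pyGetD xs i 0 = PySem.List.pyGetD xs r 0 then false
    else if PySem.List.pyGetD xs i 0 - i = PySem.List.pyGetD xs r 0 - r ∨
            PySem.List.pyGetD xs i 0 + i = PySem.List.pyGetD xs r 0 + r then false
    else fvInnerA xs i rest

def fitness_value (queen_arrangement : List Int) : Int :=
  (PySem.List.pyRange 0 8 1).foldl
    (fun fv i => if fvInnerA queen_arrangement i (PySem.List.pyRange 0 8 1) then fv + 1 else fv) 0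

-- ===== PORT B =====
def fitness_value_alt (queen_arrangement : List Int) : Int :=
  let rowk := (PySem.List.pyRange 0 8 1).map (fun i => PySem.List.pyGetD queen_arrangement i 0)
  let diagk := (PySem.List.pyRange 0 8 1).map (fun i => PySem.List.pyGetD queen_arrangement i 0 - i)
  let antik := (PySem.List.pyRange 0 8 1).map (fun i => PySem.List.pyGetD queen_arrangement i 0 + i)
  let rows := rowk.foldl (fun d v => d.insert v (d.getD v 0 + 1)) (PySem.Dict.empty : PySem.Dict Int Int)
  let diags := diagk.foldl (fun d v => d.insert v (d.getD v 0 + 1)) (PySem.Dict.empty : PySem.Dict Int Int)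
  let antis := antik.foldl (fun d v => d.insert v (d.getD v 0 + 1)) (PySem.Dict.empty : PySem.Dict Int Int)
  (PySem.List.pyRange 0 8 1).foldl
    (fun fv i =>
      let v := PySem.List.pyGetD queen_arrangement i 0
      if rows.getD v 0 = 1 ∧ diags.getD (v - i) 0 = 1 ∧ antis.getD (v + i) 0 = 1 then fv + 1 else fv) 0

-- ===== PRECONDITION & SPEC =====
-- Pre_ excludes exactly the inputs where the Python A raises IndexError (fewer than 8 entries)
def Pre_fitness_value (queen_arrangement : List Int) : Prop := 8 ≤ queen_arrangement.length
instance (queen_arrangement : List Int) : Decidable (Pre_fitness_value queen_arrangement) := by unfold Pre_fitness_value; infer_instance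
def pvWitness_fitness_value : List Int := [0, 4, 7, 5, 2, 6, 1, 3]

def Spec_fitness_value (queen_arrangement : List Int) (out : Int) : Prop := out = fitness_value_alt queen_arrangement
instance (queen_arrangement : List Int) (out : Int) : Decidable (Spec_fitness_value queen_arrangement out) := by unfold Spec_fitness_value; infer_instance

-- ===== CLAIM (what is proved, stated in full; the proofs are below) =====
def Claim_equal_fitness_value : Prop := ∀ (queen_arrangement : List Int), Dom_fitness_value queen_arrangement → Pre_fitness_value queen_arrangement → Spec_fitness_value queen_arrangement (fitness_value queen_arrangement)

-- ===== LEMMAS AND PROOFS =====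

-- A's inner break-loop returns true iff no other queen in the scanned list conflicts
theorem fvInnerA_iff (xs : List Int) (i : Int) (L : List Int) :
    fvInnerA xs i L = true ↔
      ∀ r ∈ L, r ≠ i →
        PySem.List.pyGetD xs i 0 ≠ PySem.List.pyGetD xs r 0 ∧
        PySem.List.pyGetD xs i 0 - i ≠ PySem.List.pyGetD xs r 0 - r ∧
        PySem.List.pyGetD xs i 0 + i ≠ PySem.List.pyGetD xs r 0 + r := by
  induction L with
  | nil => simp [fvInnerA]
  | cons r rest ih =>
    have hunf : fvInnerA xs i (r :: rest) =
        (if r = i then fvInnerA xs i rest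
         else if PySem.List.pyGetD xs i 0 = PySem.List.pyGetD xs r 0 then false
         else if PySem.List.pyGetD xs i 0 - i = PySem.List.pyGetD xs r 0 - r ∨
                 PySem.List.pyGetD xs i 0 + i = PySem.List.pyGetD xs r 0 + r then false
         else fvInnerA xs i rest) := rfl
    rw [hunf]
    by_cases hri : r = i
    · rw [if_pos hri, ih]
      constructor
      · intro h s hs hne
        rcases List.mem_cons.mp hs with h' | h'
        · exact absurd (h'.trans hri) hne
        · exact h s h' hne
      · intro h s hs hne; exact h s (List.mem_cons_of_mem _ hs) hne
    · rw [if_neg hri]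
      by_cases h1 : PySem.List.pyGetD xs i 0 = PySem.List.pyGetD xs r 0
      · rw [if_pos h1]
        simp only [Bool.false_eq_true, false_iff]
        intro h; exact (h r (List.mem_cons.mpr (Or.inl rfl)) hri).1 h1
      · rw [if_neg h1]
        by_cases h2 : PySem.List.pyGetD xs i 0 - i = PySem.List.pyGetD xs r 0 - r ∨
            PySem.List.pyGetD xs i 0 + i = PySem.List.pyGetD xs r 0 + r
        · rw [if_pos h2]
          simp only [Bool.false_eq_true, false_iff]
          intro h
          rcases h2 with h2 | h2
          · exact (h r (List.mem_cons.mpr (Or.inl rfl)) hri).2.1 h2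
          · exact (h r (List.mem_cons.mpr (Or.inl rfl)) hri).2.2 h2
        · rw [if_neg h2, ih]
          have h2' := not_or.mp h2
          constructor
          · intro h s hs hne
            rcases List.mem_cons.mp hs with h' | h'
            · subst h'; exact ⟨h1, h2'.1, h2'.2⟩
            · exact h s h' hne
          · intro h s hs hne; exact h s (List.mem_cons_of_mem _ hs) hne

-- in a duplicate-free list containing i with p i true, p counts to 1 iff no OTHER element satisfies p
theorem countP_eq_one_iff (L : List Int) (hnd : L.Nodup) (i : Int) (hi : i ∈ L)
    (p : Int → Bool) (hp : p i = true) :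
    L.countP p = 1 ↔ ∀ r ∈ L, r ≠ i → p r = false := by
  induction L with
  | nil => simp at hi
  | cons a rest ih =>
    have hnd' := List.nodup_cons.mp hnd
    rcases List.mem_cons.mp hi with ha | ha
    · -- i = a
      have hpa : p a = true := ha ▸ hp
      rw [List.countP_cons, if_pos hpa]
      constructor
      · intro h r hr hne
        rcases List.mem_cons.mp hr with h' | h'
        · exact absurd (h'.trans ha.symm) hne
        · have h0 : rest.countP p = 0 := by omega
          simpa using List.countP_eq_zero.mp h0 r h'
      · intro h
        have h0 : rest.countP p = 0 := List.countP_eq_zero.mpr (fun r hr => by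
          have hne : r ≠ i := fun he => hnd'.1 (ha ▸ (he ▸ hr))
          simp [h r (List.mem_cons_of_mem _ hr) hne])
        omega
    · -- i ∈ rest
      have hai : a ≠ i := fun he => hnd'.1 (he ▸ ha)
      have ih' := ih hnd'.2 ha
      rw [List.countP_cons]
      by_cases hpa : p a = true
      · rw [if_pos hpa]
        constructor
        · intro h
          exfalso
          have : 0 < rest.countP p := List.countP_pos_iff.mpr ⟨i, ha, hp⟩
          omega
        · intro h
          exact absurd (h a (List.mem_cons.mpr (Or.inl rfl)) hai) (by simp [hpa])
      · rw [if_neg hpa, Nat.add_zero, ih']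
        constructor
        · intro h r hr hne
          rcases List.mem_cons.mp hr with h' | h'
          · subst h'; simpa using hpa
          · exact h r h' hne
        · intro h r hr hne; exact h r (List.mem_cons_of_mem _ hr) hne

-- a counter of (f r for r in range(8)) looked up at key f i is 1 iff no other r maps to the same key
theorem getD_keycounter_eq_one_iff (f : Int → Int) (i : Int) (hi : i ∈ PySem.List.pyRange 0 8 1) :
    (((PySem.List.pyRange 0 8 1).map f).foldl (fun d v => d.insert v (d.getD v 0 + 1)) (PySem.Dict.empty : PySem.Dict Int Int)).getD (f i) 0 = 1 ↔
      ∀ r ∈ PySem.List.pyRange 0 8 1, r ≠ i → f r ≠ f i := by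
  simp only [PySem.Dict.getD_foldl_insert_add_one, PySem.Dict.getD_empty, zero_add]
  have hc : ((PySem.List.pyRange 0 8 1).map f).count (f i) =
      (PySem.List.pyRange 0 8 1).countP (fun r => f r == f i) := by
    rw [List.count, List.countP_map]; rfl
  have hnd : (PySem.List.pyRange 0 8 1).Nodup := by decide
  have hiff := countP_eq_one_iff (PySem.List.pyRange 0 8 1) hnd i hi (fun r => f r == f i) (by simp)
  constructor
  · intro h r hr hne
    have h1 : ((PySem.List.pyRange 0 8 1).map f).count (f i) = 1 := by exact_mod_cast h
    rw [hc] at h1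
    simpa using hiff.mp h1 r hr hne
  · intro h
    have h1 : (PySem.List.pyRange 0 8 1).countP (fun r => f r == f i) = 1 :=
      hiff.mpr (fun r hr hne => by simpa using h r hr hne)
    rw [← hc] at h1
    exact_mod_cast congrArg (Nat.cast : Nat → Int) h1

-- ===== VERDICT (by name: the statement is the Claim_ definition above) =====
theorem fitness_value_spec : Claim_equal_fitness_value := by
  intro xs _ _
  unfold Spec_fitness_value fitness_value fitness_value_alt
  apply PySem.List.foldl_congr_mem
  intro acc i hi
  have hrow := getD_keycounter_eq_one_iff (fun r => PySem.List.pyGetD xs r 0) i hi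
  have hdiag := getD_keycounter_eq_one_iff (fun r => PySem.List.pyGetD xs r 0 - r) i hi
  have hanti := getD_keycounter_eq_one_iff (fun r => PySem.List.pyGetD xs r 0 + r) i hi
  simp only at hrow hdiag hanti
  apply if_congr _ rfl rfl
  rw [fvInnerA_iff xs i]
  constructor
  · intro h
    refine ⟨hrow.mpr ?_, hdiag.mpr ?_, hanti.mpr ?_⟩
    · intro r hr hne he; exact (h r hr hne).1 he.symm
    · intro r hr hne he; exact (h r hr hne).2.1 (by omega)
    · intro r hr hne he; exact (h r hr hne).2.2 (by omega)
  · rintro ⟨h1, h2, h3⟩ r hr hne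
    exact ⟨fun he => hrow.mp h1 r hr hne he.symm,
           fun he => hdiag.mp h2 r hr hne (by omega),
           fun he => hanti.mp h3 r hr hne (by omega)⟩
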